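-- pv_equiv track=rewrite | github.com/joshkoo1988/bookbot | main.py | letter_counts
-- ===== SOURCE A (Python) =====
-- def letter_counts(text):
--     lower_text = text.lower()
--     alphabet_count = {}
--     for letter in lower_text:
--         if letter.isalpha():
--             if letter in alphabet_count:
--                 alphabet_count[letter] += 1
--             else:
--                 alphabet_count[letter] = 1
--     sorted_alphabet_count = dict(sorted(alphabet_count.items()))
--     return sorted_alphabet_count
-- ===== SOURCE B (Python) =====
-- def letter_counts(text):
--     letters = sorted(c for c in text.lower() if c.isalpha())
--     counts = {}
--     i = 0
--     n = len(letters)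
--     while i < n:
--         j = i + 1
--         while j < n and letters[j] == letters[i]:
--             j += 1
--         counts[letters[i]] = j - i
--         i = j
--     return counts
-- ===== Notes on version B (the rewrite author's own statement) =====
-- stated objective: alternative
-- what changed: B sorts the lowercase alphabetic characters up front and then makes one pass over the sorted sequence counting run-lengths of consecutive equal letters (no counting dict and no final sort of items), where A counts into a dict while scanning and sorts the items at the end.
import Mathlib
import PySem

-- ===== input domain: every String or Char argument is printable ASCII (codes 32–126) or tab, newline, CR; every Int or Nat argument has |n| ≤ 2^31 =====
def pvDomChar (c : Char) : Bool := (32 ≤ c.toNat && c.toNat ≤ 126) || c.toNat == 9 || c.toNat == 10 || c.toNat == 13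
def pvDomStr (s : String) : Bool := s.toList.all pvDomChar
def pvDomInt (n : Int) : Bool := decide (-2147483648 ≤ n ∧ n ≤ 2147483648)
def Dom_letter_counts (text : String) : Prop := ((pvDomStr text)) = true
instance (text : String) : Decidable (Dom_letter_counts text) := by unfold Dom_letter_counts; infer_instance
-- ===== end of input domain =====

-- B sorts the lowercase alphabetic characters first and counts run-lengths of equal
-- letters in one pass over the sorted sequence, instead of A's count-into-dict-then-sort;
-- objective: alternative (sort-and-group algorithm).


-- ===== PORT A =====
def letter_counts (text : String) : List (String × Int) :=
  let lower_text := (PySem.Str.lower text).toList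
  let alphabet_count : PySem.Dict String Int :=
    lower_text.foldl (fun d c =>
      if PySem.Chars.isalpha c then
        if d.contains (String.ofList [c]) then
          d.insert (String.ofList [c]) (d.getD (String.ofList [c]) 0 + 1)
        else
          d.insert (String.ofList [c]) 1
      else d) PySem.Dict.empty
  PySem.List.sorted2 alphabet_count.items (fun p => p.1) (fun p => p.2) false

-- ===== PORT B =====
-- the outer while-loop of Source B: at each position, the inner while-scan over the
-- still-equal letters is the takeWhile prefix (its length is j - i - 1), and the
-- loop resumes at j, i.e. at the dropWhile suffix
def runGroup : List Char → List (String × Int)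
  | [] => []
  | c :: rest =>
    (String.ofList [c], ((rest.takeWhile (fun x => x == c)).length + 1 : Int)) ::
      runGroup (rest.dropWhile (fun x => x == c))
termination_by cs => cs.length
decreasing_by
  simpa using Nat.lt_succ_of_le (rest.dropWhile_sublist (fun x => x == c)).length_le

def letter_counts_alt (text : String) : List (String × Int) :=
  let letters := PySem.List.sorted
    ((PySem.Str.lower text).toList.filter (fun c => PySem.Chars.isalpha c)) (fun c => c) false
  runGroup letters

-- ===== PRECONDITION & SPEC =====
def Spec_letter_counts (text : String) (out : List (String × Int)) : Prop := out = letter_counts_alt text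
instance (text : String) (out : List (String × Int)) : Decidable (Spec_letter_counts text out) := by unfold Spec_letter_counts; infer_instance

-- ===== CLAIM (what is proved, stated in full; the proofs are below) =====
def Claim_equal_letter_counts : Prop := ∀ (text : String), Dom_letter_counts text → Spec_letter_counts text (letter_counts text)

-- ===== LEMMAS AND PROOFS =====

theorem strOfList_singleton_inj : Function.Injective (fun c : Char => String.ofList [c]) := by
  intro c d h
  simpa using congrArg String.toList h

theorem strOfList_singleton_lt {c d : Char} (h : c < d) :
    String.ofList [c] < String.ofList [d] := by
  rw [String.lt_iff_toList_lt]
  simpa using List.Lex.rel (r := (· < ·)) h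

-- A's counting loop is Counter of the lowercase alphabetic characters (as 1-char strings)
theorem loopA_eq_counter (cs : List Char) :
    cs.foldl (fun d c =>
      if PySem.Chars.isalpha c then
        if d.contains (String.ofList [c]) then
          d.insert (String.ofList [c]) (d.getD (String.ofList [c]) 0 + 1)
        else
          d.insert (String.ofList [c]) 1
      else d) PySem.Dict.empty
    = PySem.Dict.counter ((cs.filter (fun c => PySem.Chars.isalpha c)).map (fun c => String.ofList [c])) := by
  rw [← PySem.Dict.foldl_insert_getD_add_one_eq_counter, List.foldl_map, List.foldl_filter]
  have hstep : (fun (d : PySem.Dict String Int) c =>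
      if PySem.Chars.isalpha c then
        if d.contains (String.ofList [c]) then
          d.insert (String.ofList [c]) (d.getD (String.ofList [c]) 0 + 1)
        else
          d.insert (String.ofList [c]) 1
      else d)
      = (fun d c => if PySem.Chars.isalpha c = true then
          d.insert (String.ofList [c]) (d.getD (String.ofList [c]) 0 + 1) else d) := by
    funext d c
    split_ifs with h1 h2
    · rfl
    · rw [PySem.Dict.getD_of_not_contains _ _ (Bool.eq_false_iff.2 h2)]
      norm_num
    · rfl
  rw [hstep]

theorem insertBy_congr {α : Type} (p q : α → α → Bool) (x : α) (ys : List α)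
    (h : ∀ y ∈ ys, p x y = q x y) :
    PySem.List.insertBy p x ys = PySem.List.insertBy q x ys := by
  induction ys with
  | nil => rfl
  | cons y ys ih =>
    simp only [PySem.List.insertBy]
    rw [h y (by simp)]
    split
    · rfl
    · rw [ih (fun z hz => h z (by simp [hz]))]

theorem foldl_insertBy_congr {α : Type} (p q : α → α → Bool) (xs : List α) :
    ∀ (acc : List α), (∀ a ∈ xs, ∀ b, (b ∈ acc ∨ b ∈ xs) → p a b = q a b) →
    xs.foldl (fun acc x => PySem.List.insertBy p x acc) acc
      = xs.foldl (fun acc x => PySem.List.insertBy q x acc) acc := by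
  induction xs with
  | nil => intro acc _; rfl
  | cons x xs ih =>
    intro acc h
    simp only [List.foldl_cons]
    rw [insertBy_congr p q x acc (fun y hy => h x (by simp) y (Or.inl hy))]
    exact ih (PySem.List.insertBy q x acc) (fun a ha b hb => by
      rcases hb with hb | hb
      · rcases (PySem.List.mem_insertBy _ _ _ _).1 hb with rfl | hb
        · exact h a (by simp [ha]) b (Or.inr (by simp))
        · exact h a (by simp [ha]) b (Or.inl hb)
      · exact h a (by simp [ha]) b (Or.inr (by simp [hb])))

-- on a list whose first components determine the elements, Python's tuple sort is the key-fst sort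
theorem sorted2_eq_sorted_fst (xs : List (String × Int))
    (huniq : ∀ a ∈ xs, ∀ b ∈ xs, a.1 = b.1 → a = b) :
    PySem.List.sorted2 xs (fun p => p.1) (fun p => p.2) false
      = PySem.List.sorted xs (fun p => p.1) false := by
  simp only [PySem.List.sorted2, PySem.List.sorted, if_neg (by decide : ¬ (false = true))]
  apply foldl_insertBy_congr
  intro a ha b hb
  have hb' : b ∈ xs := by
    rcases hb with hb | hb
    · exact absurd hb (List.not_mem_nil)
    · exact hb
  rcases lt_trichotomy a.1 b.1 with hlt | heq | hgt
  · simp [hlt]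
  · have hab : a = b := huniq a ha b hb' heq
    subst hab
    simp
  · simp [hgt, not_lt.2 (le_of_lt hgt)]

-- the distinct letters of a sorted character list, in order (proof skeleton of runGroup)
def uniqSorted : List Char → List Char
  | [] => []
  | c :: rest => c :: uniqSorted (rest.dropWhile (fun x => x == c))
termination_by cs => cs.length
decreasing_by
  simpa using Nat.lt_succ_of_le (rest.dropWhile_sublist (fun x => x == c)).length_le

theorem mem_of_mem_uniqSorted (cs : List Char) (a : Char) (h : a ∈ uniqSorted cs) : a ∈ cs := by
  induction cs using uniqSorted.induct with
  | case1 => simp [uniqSorted] at h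
  | case2 c rest ih =>
    rw [uniqSorted] at h
    rcases List.mem_cons.1 h with rfl | h
    · exact List.mem_cons_self
    · exact List.mem_cons_of_mem _ ((rest.dropWhile_sublist _).mem (ih h))

theorem lt_of_mem_dropWhile (c : Char) (rest : List Char)
    (hge : ∀ y ∈ rest, c ≤ y) (hp : rest.Pairwise (· ≤ ·)) :
    ∀ y ∈ rest.dropWhile (fun x => x == c), c < y := by
  induction rest with
  | nil => intro y hy; simp at hy
  | cons x t ih =>
    intro y hy
    by_cases hx : x = c
    · subst hx
      rw [List.dropWhile_cons_of_pos (by simp)] at hy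
      exact ih (fun z hz => hge z (List.mem_cons_of_mem _ hz)) hp.of_cons y hy
    · rw [List.dropWhile_cons_of_neg (by simpa using hx)] at hy
      have hxc : c < x := lt_of_le_of_ne (hge x List.mem_cons_self) (Ne.symm hx)
      rcases List.mem_cons.1 hy with rfl | hy
      · exact hxc
      · exact lt_of_lt_of_le hxc ((List.pairwise_cons.1 hp).1 y hy)

theorem pairwise_uniqSorted (cs : List Char) (hp : cs.Pairwise (· ≤ ·)) :
    (uniqSorted cs).Pairwise (· < ·) := by
  induction cs using uniqSorted.induct with
  | case1 => simp [uniqSorted]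
  | case2 c rest ih =>
    rw [uniqSorted]
    refine List.pairwise_cons.2 ⟨?_, ?_⟩
    · intro a ha
      exact lt_of_mem_dropWhile c rest (List.pairwise_cons.1 hp).1 hp.of_cons a
        (mem_of_mem_uniqSorted _ a ha)
    · exact ih (List.Pairwise.sublist (rest.dropWhile_sublist _) hp.of_cons)

theorem mem_uniqSorted_of_mem (cs : List Char) (hp : cs.Pairwise (· ≤ ·)) (a : Char)
    (h : a ∈ cs) : a ∈ uniqSorted cs := by
  induction cs using uniqSorted.induct with
  | case1 => simp at h
  | case2 c rest ih =>
    rw [uniqSorted]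
    rcases List.mem_cons.1 h with rfl | h
    · exact List.mem_cons_self
    · rcases (List.mem_append.1 ((rest.takeWhile_append_dropWhile (p := fun x => x == c)) ▸ h))
        with h | h
      · have : a = c := by simpa using List.mem_takeWhile_imp h
        simp [this]
      · exact List.mem_cons_of_mem _ (ih (List.Pairwise.sublist (rest.dropWhile_sublist _) hp.of_cons) h)

theorem runGroup_eq_map (cs : List Char) (hp : cs.Pairwise (· ≤ ·)) :
    runGroup cs = (uniqSorted cs).map (fun c => (String.ofList [c], (cs.count c : Int))) := by
  induction cs using uniqSorted.induct with
  | case1 => simp [runGroup, uniqSorted]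
  | case2 c rest ih =>
    have hge : ∀ y ∈ rest, c ≤ y := (List.pairwise_cons.1 hp).1
    have hrp : rest.Pairwise (· ≤ ·) := hp.of_cons
    have hdp : (rest.dropWhile (fun x => x == c)).Pairwise (· ≤ ·) :=
      List.Pairwise.sublist (rest.dropWhile_sublist _) hrp
    have hsplit : rest = rest.takeWhile (fun x => x == c) ++ rest.dropWhile (fun x => x == c) :=
      (rest.takeWhile_append_dropWhile (p := fun x => x == c)).symm
    rw [runGroup, uniqSorted, List.map_cons, ih hdp]
    refine congrArg₂ _ ?_ ?_
    · -- head: run length = count of c in the whole list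
      have hc0 : (rest.dropWhile (fun x => x == c)).count c = 0 := by
        rw [List.count_eq_zero]
        intro hmem
        exact absurd rfl (ne_of_gt (lt_of_mem_dropWhile c rest hge hrp c hmem))
      have hct : (rest.takeWhile (fun x => x == c)).count c
          = (rest.takeWhile (fun x => x == c)).length := by
        rw [List.count_eq_length]
        intro b hb
        exact (by simpa using List.mem_takeWhile_imp hb : b = c).symm
      have : (c :: rest).count c
          = (rest.takeWhile (fun x => x == c)).length + 1 := by
        rw [List.count_cons_self]
        conv_lhs => rw [hsplit]
        rw [List.count_append, hc0, hct]
      rw [this]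
      push_cast
      ring_nf
    · -- tail: counts of later letters are unchanged by dropping the c-run
      apply List.map_congr_left
      intro a ha
      have hadrop : a ∈ rest.dropWhile (fun x => x == c) := mem_of_mem_uniqSorted _ a ha
      have hac : c < a := lt_of_mem_dropWhile c rest hge hrp a hadrop
      have h1 : (c :: rest).count a = rest.count a :=
        List.count_cons_of_ne hac.ne
      have h2 : (rest.takeWhile (fun x => x == c)).count a = 0 := by
        rw [List.count_eq_zero]
        intro hmem
        have : a = c := by simpa using List.mem_takeWhile_imp hmem
        exact absurd this (ne_of_gt hac)
      have : (c :: rest).count a = (rest.dropWhile (fun x => x == c)).count a := by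
        rw [h1]
        conv_lhs => rw [hsplit]
        rw [List.count_append, h2]
        ring
      rw [this]

-- ===== VERDICT (by name: the statement is the Claim_ definition above) =====
theorem letter_counts_spec : Claim_equal_letter_counts := by
  intro text _
  show letter_counts text = letter_counts_alt text
  simp only [letter_counts, letter_counts_alt]
  rw [loopA_eq_counter]
  set lowered := (PySem.Str.lower text).toList.filter (fun c => PySem.Chars.isalpha c) with hlow
  set f : Char → String := fun c => String.ofList [c] with hf
  rw [PySem.Dict.items_counter]
  set s := PySem.List.sorted lowered (fun c => c) false with hs
  have hsp : s.Pairwise (· ≤ ·) := by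
    simpa using PySem.List.sorted_pairwise lowered (fun c => c)
  have hcount : ∀ c, s.count c = lowered.count c := fun c =>
    (PySem.List.sorted_perm lowered (fun c => c) false).count_eq c
  rw [runGroup_eq_map s hsp]
  set items := (PySem.Set.ofList (lowered.map f)).map
      (fun k => (k, (List.count k (lowered.map f) : Int))) with hitems
  have huniq : ∀ a ∈ items, ∀ b ∈ items, a.1 = b.1 → a = b := by
    intro a ha b hb hfst
    rw [hitems] at ha hb
    rcases List.mem_map.1 ha with ⟨k, _, rfl⟩
    rcases List.mem_map.1 hb with ⟨k', _, rfl⟩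
    simp only at hfst
    rw [hfst]
  rw [sorted2_eq_sorted_fst _ huniq]
  apply PySem.List.sorted_eq_of_perm_of_pairwise_lt
  · -- B's list is a permutation of the counter's items
    have hperm0 : (uniqSorted s).Perm (PySem.Set.ofList lowered) := by
      rw [List.perm_ext_iff_of_nodup
        ((pairwise_uniqSorted s hsp).nodup) (PySem.Set.nodup_ofList _)]
      intro a
      rw [PySem.Set.mem_ofList]
      constructor
      · intro h
        exact (PySem.List.mem_sorted _ _ _ _).1 (mem_of_mem_uniqSorted s a h)
      · intro h
        exact mem_uniqSorted_of_mem s hsp a ((PySem.List.mem_sorted _ _ _ _).2 h)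
    have hmapeq : (uniqSorted s).map (fun c => (f c, (s.count c : Int)))
        = (uniqSorted s).map (fun c => (f c, (lowered.count c : Int))) := by
      apply List.map_congr_left
      intro c _
      rw [hcount]
    have h1 : ((uniqSorted s).map (fun c => (f c, (lowered.count c : Int)))).Perm
        ((PySem.Set.ofList lowered).map (fun c => (f c, (lowered.count c : Int)))) :=
      hperm0.map _
    have h2 : (PySem.Set.ofList lowered).map (fun c => (f c, (lowered.count c : Int)))
        = ((PySem.Set.ofList lowered).map f).map
            (fun k => (k, (List.count k (lowered.map f) : Int))) := by
      rw [List.map_map]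
      apply List.map_congr_left
      intro c _
      simp only [Function.comp]
      rw [List.count_map_of_injective _ _ strOfList_singleton_inj]
    have h3 : ((PySem.Set.ofList lowered).map f).Perm (PySem.Set.ofList (lowered.map f)) := by
      rw [List.perm_ext_iff_of_nodup
        (List.Nodup.map strOfList_singleton_inj (PySem.Set.nodup_ofList lowered))
        (PySem.Set.nodup_ofList _)]
      intro a
      constructor
      · intro hmem
        rcases List.mem_map.1 hmem with ⟨c, hc, rfl⟩
        exact (PySem.Set.mem_ofList _ _).2 (List.mem_map.2 ⟨c, (PySem.Set.mem_ofList _ _).1 hc, rfl⟩)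
      · intro hmem
        rcases List.mem_map.1 ((PySem.Set.mem_ofList _ _).1 hmem) with ⟨c, hc, rfl⟩
        exact List.mem_map.2 ⟨c, (PySem.Set.mem_ofList _ _).2 hc, rfl⟩
    exact hmapeq ▸ (h1.trans (h2 ▸ (h3.map (fun k => (k, (List.count k (lowered.map f) : Int))))))
  · -- and strictly increasing in its keys
    exact List.Pairwise.map _ (fun a b hab => strOfList_singleton_lt hab)
      (pairwise_uniqSorted s hsp)
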